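-- pv_equiv track=rewrite | github.com/JakovKordic/traffic-simulator-cellular-automata | src/ca.py | build_roads
-- ===== SOURCE A (Python) =====
-- def build_roads(height, width, horizontal_rows, vertical_cols):
--     roads = []
--     for _ in range(height):
--         row = [""] * width
--         roads.append(row)
--
--     for y in horizontal_rows:
--         if 0 <= y < height:
--             for x in range(width):
--                 if "E" not in roads[y][x]:
--                     roads[y][x] += "E"
--                 if "W" not in roads[y][x]:
--                     roads[y][x] += "W"
--
--     for x in vertical_cols:
--         if 0 <= x < width:
--             for y in range(height):
--                 if "N" not in roads[y][x]:
--                     roads[y][x] += "N"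
--                 if "S" not in roads[y][x]:
--                     roads[y][x] += "S"
--
--     return roads
-- ===== SOURCE B (Python) =====
-- def build_roads(height, width, horizontal_rows, vertical_cols):
--     hset = {y for y in horizontal_rows if 0 <= y < height}
--     vset = {x for x in vertical_cols if 0 <= x < width}
--     return [[("EW" if y in hset else "") + ("NS" if x in vset else "")
--              for x in range(width)]
--             for y in range(height)]
-- ===== Notes on version B (the rewrite author's own statement) =====
-- stated objective: simpler
-- what changed: Replaces the three mutation passes (initialise grid, paint horizontal stripes cell-by-cell with substring guards, paint vertical stripes) by precomputing the in-range row/column sets once and building each cell directly in a single comprehension.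
import Mathlib
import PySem

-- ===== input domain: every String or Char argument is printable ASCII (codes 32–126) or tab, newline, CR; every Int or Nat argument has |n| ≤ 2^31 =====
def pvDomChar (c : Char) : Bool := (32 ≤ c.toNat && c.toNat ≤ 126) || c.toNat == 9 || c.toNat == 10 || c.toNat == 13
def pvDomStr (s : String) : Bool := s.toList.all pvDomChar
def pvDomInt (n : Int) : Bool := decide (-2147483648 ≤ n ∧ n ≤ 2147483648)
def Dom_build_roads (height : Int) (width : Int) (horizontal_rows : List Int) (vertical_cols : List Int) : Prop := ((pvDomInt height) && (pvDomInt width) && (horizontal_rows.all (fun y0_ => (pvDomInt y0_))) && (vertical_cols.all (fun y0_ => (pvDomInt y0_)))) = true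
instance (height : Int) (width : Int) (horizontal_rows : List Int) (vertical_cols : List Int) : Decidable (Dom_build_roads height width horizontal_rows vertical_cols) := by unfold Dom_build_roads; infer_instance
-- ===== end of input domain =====

-- B replaces A's three mutation passes (init grid, paint horizontal stripes, paint vertical stripes)
-- by precomputing the in-range row/column sets and building each cell directly in one pass (simpler).


-- ===== PORT A =====
-- cell update of the horizontal pass: if "E" not in c: c += "E"; if "W" not in c: c += "W"
def pvAddEW (c : String) : String :=
  let c := if PySem.Str.isIn "E" c then c else c ++ "E"
  if PySem.Str.isIn "W" c then c else c ++ "W"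

-- cell update of the vertical pass: if "N" not in c: c += "N"; if "S" not in c: c += "S"
def pvAddNS (c : String) : String :=
  let c := if PySem.Str.isIn "N" c then c else c ++ "N"
  if PySem.Str.isIn "S" c then c else c ++ "S"

-- roads = []; for _ in range(height): roads.append([""] * width)
def pvInit (height width : Int) : List (List String) :=
  (PySem.List.pyRange 0 height 1).foldl (fun roads _ => roads ++ [PySem.List.pyRepeat [""] width]) []

-- one iteration of "for y in horizontal_rows": if 0 <= y < height: for x in range(width): update roads[y][x]
def pvHStep (height width : Int) (roads : List (List String)) (y : Int) : List (List String) :=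
  if 0 ≤ y ∧ y < height then
    (PySem.List.pyRange 0 width 1).foldl (fun r x =>
      PySem.List.pySetD r y (PySem.List.pySetD (PySem.List.pyGetD r y []) x
        (pvAddEW (PySem.List.pyGetD (PySem.List.pyGetD r y []) x "")))) roads
  else roads

-- one iteration of "for x in vertical_cols": if 0 <= x < width: for y in range(height): update roads[y][x]
def pvVStep (height width : Int) (roads : List (List String)) (x : Int) : List (List String) :=
  if 0 ≤ x ∧ x < width then
    (PySem.List.pyRange 0 height 1).foldl (fun r y =>
      PySem.List.pySetD r y (PySem.List.pySetD (PySem.List.pyGetD r y []) x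
        (pvAddNS (PySem.List.pyGetD (PySem.List.pyGetD r y []) x "")))) roads
  else roads

def build_roads (height : Int) (width : Int) (horizontal_rows : List Int) (vertical_cols : List Int) : List (List String) :=
  vertical_cols.foldl (pvVStep height width)
    (horizontal_rows.foldl (pvHStep height width) (pvInit height width))

-- ===== PORT B =====
def build_roads_alt (height : Int) (width : Int) (horizontal_rows : List Int) (vertical_cols : List Int) : List (List String) :=
  let hset := PySem.Set.ofList (horizontal_rows.filter (fun y => decide (0 ≤ y ∧ y < height)))
  let vset := PySem.Set.ofList (vertical_cols.filter (fun x => decide (0 ≤ x ∧ x < width)))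
  (PySem.List.pyRange 0 height 1).map (fun y =>
    (PySem.List.pyRange 0 width 1).map (fun x =>
      (if y ∈ hset then "EW" else "") ++ (if x ∈ vset then "NS" else "")))

-- ===== PRECONDITION & SPEC =====
def Spec_build_roads (height : Int) (width : Int) (horizontal_rows : List Int) (vertical_cols : List Int) (out : List (List String)) : Prop := out = build_roads_alt height width horizontal_rows vertical_cols
instance (height : Int) (width : Int) (horizontal_rows : List Int) (vertical_cols : List Int) (out : List (List String)) : Decidable (Spec_build_roads height width horizontal_rows vertical_cols out) := by unfold Spec_build_roads; infer_instance

-- ===== CLAIM (what is proved, stated in full; the proofs are below) =====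
def Claim_equal_build_roads : Prop := ∀ (height : Int) (width : Int) (horizontal_rows : List Int) (vertical_cols : List Int), Dom_build_roads height width horizontal_rows vertical_cols → Spec_build_roads height width horizontal_rows vertical_cols (build_roads height width horizontal_rows vertical_cols)

-- ===== LEMMAS AND PROOFS =====

-- the value of every cell, as a function of "row is a horizontal road" / "column is a vertical road"
def pvCell (p q : Bool) : String := (if p then "EW" else "") ++ (if q then "NS" else "")

-- the grid whose cell (y, x) is pvCell (P y) (Q x)
def pvGrid (height width : Int) (P Q : Int → Bool) : List (List String) :=
  (List.range height.toNat).map (fun (y : Nat) =>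
    (List.range width.toNat).map (fun (x : Nat) => pvCell (P (y : Int)) (Q (x : Int))))

theorem pvGrid_congr (h w : Int) (P P' Q Q' : Int → Bool)
    (hP : ∀ z, P z = P' z) (hQ : ∀ z, Q z = Q' z) :
    pvGrid h w P Q = pvGrid h w P' Q' := by
  simp only [pvGrid, hP, hQ]

theorem pvAddEW_cell (p : Bool) : pvAddEW (pvCell p false) = pvCell true false := by
  cases p <;> decide

theorem pvAddNS_cell (p q : Bool) : pvAddNS (pvCell p q) = pvCell p true := by
  cases p <;> cases q <;> decide

theorem pvRange0 (n : Int) :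
    PySem.List.pyRange 0 n 1 = (List.range n.toNat).map (fun (k : Nat) => (k : Int)) := by
  by_cases hn : 0 ≤ n
  · have h := PySem.List.pyRange_zero_natCast n.toNat
    rwa [Int.toNat_of_nonneg hn] at h
  · have h1 : n.toNat = 0 := Int.toNat_of_nonpos (by omega)
    rw [PySem.List.pyRange_one_eq_nil (by omega), h1]
    rfl

theorem pvSetMapRange {α : Type} (f : Nat → α) (n k : Nat) (v : α) :
    ((List.range n).map f).set k v
      = (List.range n).map (fun i => if i = k then v else f i) := by
  apply List.ext_getElem
  · simp
  · intro i hi hi2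
    rw [List.getElem_set]
    simp only [List.getElem_map, List.getElem_range]
    split_ifs with h1 h2 h2
    · rfl
    · omega
    · omega
    · rfl

theorem pvFoldlSetShift {α : Type} (f : α → α) (d : α) (idxs : List Nat) :
    ∀ (y : α) (xs : List α),
      idxs.foldl (fun ρ i => ρ.set (i + 1) (f (ρ.getD (i + 1) d))) (y :: xs)
        = y :: idxs.foldl (fun ρ i => ρ.set i (f (ρ.getD i d))) xs := by
  induction idxs with
  | nil => intro y xs; rfl
  | cons i t ih =>
      intro y xs
      simp only [List.foldl_cons, List.getD_cons_succ, List.set_cons_succ]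
      exact ih y _

theorem pvFoldlSet {α : Type} (f : α → α) (d : α) (l : List α) :
    (List.range l.length).foldl (fun ρ i => ρ.set i (f (ρ.getD i d))) l = l.map f := by
  induction l with
  | nil => rfl
  | cons x xs ih =>
      rw [List.length_cons, List.range_succ_eq_map]
      simp only [List.foldl_cons, List.getD_cons_zero, List.set_cons_zero, List.foldl_map]
      rw [pvFoldlSetShift f d (List.range xs.length) (f x) xs, ih]
      rfl

-- the pyRange/pySetD/pyGetD version of pvFoldlSet
theorem pvL1 {α : Type} (f : α → α) (d : α) (l : List α) (w : Int) (hw : l.length = w.toNat) :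
    (PySem.List.pyRange 0 w 1).foldl
        (fun ρ i => PySem.List.pySetD ρ i (f (PySem.List.pyGetD ρ i d))) l = l.map f := by
  rw [pvRange0, List.foldl_map, ← hw]
  simp only [PySem.List.pySetD_natCast, PySem.List.pyGetD_natCast]
  exact pvFoldlSet f d l

-- a fold that only touches row y equals one set of row y
theorem pvLfix (g : List String → Int → List String) (y : Int) (hy : 0 ≤ y) :
    ∀ (xs : List Int) (r : List (List String)), y < (r.length : Int) →
      xs.foldl (fun r x => PySem.List.pySetD r y (g (PySem.List.pyGetD r y []) x)) r
        = PySem.List.pySetD r y (xs.foldl g (PySem.List.pyGetD r y [])) := by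
  intro xs
  induction xs with
  | nil =>
      intro r hr
      rw [List.foldl_nil, List.foldl_nil, PySem.List.pySetD_of_nonneg r _ hy,
        PySem.List.pyGetD_of_nonneg r _ hy, List.getD_eq_getElem _ _ (by omega),
        List.set_getElem_self]
  | cons x t ih =>
      intro r hr
      rw [List.foldl_cons, List.foldl_cons]
      have hlen : y < ((PySem.List.pySetD r y (g (PySem.List.pyGetD r y []) x)).length : Int) := by
        rw [PySem.List.pySetD_of_nonneg r _ hy, List.length_set]; exact hr
      rw [ih _ hlen]
      have hget : PySem.List.pyGetD (PySem.List.pySetD r y (g (PySem.List.pyGetD r y []) x)) y []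
          = g (PySem.List.pyGetD r y []) x := by
        rw [PySem.List.pySetD_of_nonneg r _ hy, PySem.List.pyGetD_of_nonneg _ _ hy,
          List.getD_eq_getElem _ _ (by simpa using (by omega : y.toNat < r.length)),
          List.getElem_set_self]
      rw [hget, PySem.List.pySetD_of_nonneg _ _ hy, PySem.List.pySetD_of_nonneg r _ hy,
        PySem.List.pySetD_of_nonneg r _ hy, List.set_set]

theorem pvCell_ff : pvCell false false = "" := rfl

theorem pvInit_grid (h w : Int) :
    pvInit h w = pvGrid h w (fun _ => false) (fun _ => false) := by
  unfold pvInit pvGrid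
  rw [PySem.List.foldl_append_singleton_eq_map (fun _ => PySem.List.pyRepeat [""] w),
    pvRange0, PySem.List.pyRepeat_singleton]
  simp [List.map_map, pvCell_ff, List.map_const', Function.comp_def]

theorem pvGrid_length (h w : Int) (P Q : Int → Bool) :
    (pvGrid h w P Q).length = h.toNat := by
  simp [pvGrid]

theorem pvGrid_getD (h w : Int) (P Q : Int → Bool) (y : Int) (h0 : 0 ≤ y) (h1 : y < h) :
    PySem.List.pyGetD (pvGrid h w P Q) y []
      = (List.range w.toNat).map (fun (x : Nat) => pvCell (P y) (Q (x : Int))) := by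
  rw [PySem.List.pyGetD_of_nonneg _ _ h0]
  unfold pvGrid
  rw [List.getD_eq_getElem _ _ (by simp; omega)]
  simp only [List.getElem_map, List.getElem_range, Int.toNat_of_nonneg h0]

theorem pvHStep_grid (h w : Int) (P : Int → Bool) (y : Int) :
    pvHStep h w (pvGrid h w P (fun _ => false)) y
      = pvGrid h w (fun z => P z || decide (z = y ∧ 0 ≤ y ∧ y < h)) (fun _ => false) := by
  unfold pvHStep
  by_cases hc : 0 ≤ y ∧ y < h
  · rw [if_pos hc]
    have hylen : y < ((pvGrid h w P (fun _ => false)).length : Int) := by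
      rw [pvGrid_length]; omega
    rw [pvLfix (fun row x => PySem.List.pySetD row x (pvAddEW (PySem.List.pyGetD row x "")))
        y hc.1 _ _ hylen]
    rw [pvGrid_getD h w P _ y hc.1 hc.2]
    rw [pvL1 pvAddEW "" _ w (by simp)]
    rw [List.map_map, PySem.List.pySetD_of_nonneg _ _ hc.1]
    unfold pvGrid
    rw [pvSetMapRange]
    apply List.map_congr_left
    intro i hi
    rw [List.mem_range] at hi
    by_cases hiy : i = y.toNat
    · rw [if_pos hiy]
      have hzy : ((i : Int) = y ∧ 0 ≤ y ∧ y < h) := by constructor <;> omega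
      apply List.map_congr_left
      intro j _
      simp [pvAddEW_cell, decide_eq_true hzy]
    · rw [if_neg hiy]
      have hzy : ¬ ((i : Int) = y ∧ 0 ≤ y ∧ y < h) := by
        rintro ⟨h1, -⟩; omega
      apply List.map_congr_left
      intro j _
      simp [decide_eq_false hzy]
  · rw [if_neg hc]
    apply pvGrid_congr _ _ _ _ _ _ _ (fun z => rfl)
    intro z
    have hzy : ¬ (z = y ∧ 0 ≤ y ∧ y < h) := by tauto
    simp [decide_eq_false hzy]

theorem pvStage1 (h w : Int) (l : List Int) :
    ∀ (P : Int → Bool),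
      l.foldl (pvHStep h w) (pvGrid h w P (fun _ => false))
        = pvGrid h w (fun z => P z || l.any (fun y => decide (z = y ∧ 0 ≤ y ∧ y < h)))
            (fun _ => false) := by
  induction l with
  | nil => intro P; simp
  | cons a t ih =>
      intro P
      rw [List.foldl_cons, pvHStep_grid, ih]
      apply pvGrid_congr <;> intro z <;> simp [Bool.or_assoc]

theorem pvVStep_grid (h w : Int) (P Q : Int → Bool) (x : Int) :
    pvVStep h w (pvGrid h w P Q) x
      = pvGrid h w P (fun z => Q z || decide (z = x ∧ 0 ≤ x ∧ x < w)) := by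
  unfold pvVStep
  by_cases hc : 0 ≤ x ∧ x < w
  · rw [if_pos hc]
    rw [pvL1 (fun row => PySem.List.pySetD row x
        (pvAddNS (PySem.List.pyGetD row x ""))) [] _ h (pvGrid_length h w P Q)]
    unfold pvGrid
    rw [List.map_map]
    apply List.map_congr_left
    intro i _
    simp only [Function.comp_def]
    rw [PySem.List.pyGetD_of_nonneg _ _ hc.1,
      List.getD_eq_getElem _ _ (by simp; omega),
      List.getElem_map, List.getElem_range, Int.toNat_of_nonneg hc.1,
      pvAddNS_cell, PySem.List.pySetD_of_nonneg _ _ hc.1, pvSetMapRange]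
    apply List.map_congr_left
    intro j hj
    rw [List.mem_range] at hj
    by_cases hjx : j = x.toNat
    · rw [if_pos hjx]
      have hzx : ((j : Int) = x ∧ 0 ≤ x ∧ x < w) := by constructor <;> omega
      simp [decide_eq_true hzx]
    · rw [if_neg hjx]
      have hzx : ¬ ((j : Int) = x ∧ 0 ≤ x ∧ x < w) := by
        rintro ⟨h1, -⟩; omega
      simp [decide_eq_false hzx]
  · rw [if_neg hc]
    apply pvGrid_congr _ _ _ _ _ _ (fun z => rfl)
    intro z
    have hzx : ¬ (z = x ∧ 0 ≤ x ∧ x < w) := by tauto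
    simp [decide_eq_false hzx]

theorem pvStage2 (h w : Int) (l : List Int) :
    ∀ (P Q : Int → Bool),
      l.foldl (pvVStep h w) (pvGrid h w P Q)
        = pvGrid h w P (fun z => Q z || l.any (fun x => decide (z = x ∧ 0 ≤ x ∧ x < w))) := by
  induction l with
  | nil => intro P Q; simp
  | cons a t ih =>
      intro P Q
      rw [List.foldl_cons, pvVStep_grid, ih]
      apply pvGrid_congr <;> intro z <;> simp [Bool.or_assoc]

theorem pvAlt_grid (h w : Int) (hr vc : List Int) :
    build_roads_alt h w hr vc
      = pvGrid h w
          (fun z => decide (z ∈ PySem.Set.ofList (hr.filter (fun y => decide (0 ≤ y ∧ y < h)))))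
          (fun z => decide (z ∈ PySem.Set.ofList (vc.filter (fun x => decide (0 ≤ x ∧ x < w))))) := by
  unfold build_roads_alt pvGrid
  rw [pvRange0, pvRange0, List.map_map]
  apply List.map_congr_left
  intro a _
  simp only [Function.comp_def]
  rw [List.map_map]
  apply List.map_congr_left
  intro b _
  simp only [Function.comp_def, pvCell]
  by_cases h1 : (a : Int) ∈ PySem.Set.ofList (hr.filter (fun y => decide (0 ≤ y ∧ y < h))) <;>
    by_cases h2 : (b : Int) ∈ PySem.Set.ofList (vc.filter (fun x => decide (0 ≤ x ∧ x < w))) <;>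
      simp only [h1, h2, decide_true, decide_false, if_true, if_false, Bool.false_eq_true]

-- ===== VERDICT (by name: the statement is the Claim_ definition above) =====
theorem build_roads_spec : Claim_equal_build_roads := by
  intro h w hr vc _
  unfold Spec_build_roads
  rw [build_roads, pvInit_grid, pvStage1, pvStage2, pvAlt_grid]
  apply pvGrid_congr <;> intro z <;> rw [Bool.eq_iff_iff] <;>
    simp only [Bool.false_or, List.any_eq_true, decide_eq_true_eq,
      PySem.Set.mem_ofList, List.mem_filter] <;>
    constructor
  · rintro ⟨y, hy, rfl, hb⟩; exact ⟨hy, by simpa using hb⟩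
  · rintro ⟨hz, hb⟩; exact ⟨z, hz, rfl, by simpa using hb⟩
  · rintro ⟨x, hx, rfl, hb⟩; exact ⟨hx, by simpa using hb⟩
  · rintro ⟨hz, hb⟩; exact ⟨z, hz, rfl, by simpa using hb⟩
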